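-- pv_equiv track=rewrite | github.com/Fredrik93/python-projects | elementsofai/flip_the_coin_ex7.py | count
-- ===== SOURCE A (Python) =====
-- def count(seq):
--     # insert code to return the number of occurrences of 11111 in the sequence
--     countOnes = 0
--     occurrencesOfOnes = 0
--     for num in seq:
--         if num == 1:
--             countOnes = countOnes +1
--         else:
--             countOnes = 0
--
--         if (countOnes == 5):
--             occurrencesOfOnes = occurrencesOfOnes +1
--             countOnes = 4
--
--     return occurrencesOfOnes
-- ===== SOURCE B (Python) =====
-- def count(seq):
--     # Run-length segmentation: each maximal run of L consecutive 1s
--     # contributes max(0, L - 4) overlapping occurrences of 11111.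
--     total = 0
--     run = 0
--     for num in seq:
--         if num == 1:
--             run += 1
--         else:
--             total += max(0, run - 4)
--             run = 0
--     return total + max(0, run - 4)
-- ===== Notes on version B (the rewrite author's own statement) =====
-- stated objective: simpler
-- what changed: Replaced the cap-at-4 counter trick (reset the streak counter to 4 each time it reaches 5) by run-length segmentation: maintain the current run of 1s and on each run close add the closed-form contribution max(0, run-4).
import Mathlib
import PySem

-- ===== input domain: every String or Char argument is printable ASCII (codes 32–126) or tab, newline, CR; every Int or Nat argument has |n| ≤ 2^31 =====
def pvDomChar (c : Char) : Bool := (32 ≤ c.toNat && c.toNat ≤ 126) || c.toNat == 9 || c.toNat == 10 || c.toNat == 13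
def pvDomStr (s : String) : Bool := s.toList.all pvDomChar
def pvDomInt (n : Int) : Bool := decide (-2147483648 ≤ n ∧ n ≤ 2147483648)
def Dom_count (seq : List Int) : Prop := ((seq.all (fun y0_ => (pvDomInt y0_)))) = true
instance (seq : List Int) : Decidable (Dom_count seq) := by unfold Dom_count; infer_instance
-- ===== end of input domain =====

-- B replaces A's cap-at-4 streak counter by run-length segmentation with a per-run closed-form contribution max(0, run-4); same complexity, plainer decomposition.

-- ===== PORT A =====
def count (seq : List Int) : Int :=
  (seq.foldl (fun (st : Int × Int) num =>
      let c := if num == 1 then st.1 + 1 else 0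
      if c == 5 then (4, st.2 + 1) else (c, st.2)) (0, 0)).2

-- ===== PORT B =====
def count_alt (seq : List Int) : Int :=
  let st := seq.foldl (fun (st : Int × Int) num =>
      if num == 1 then (st.1 + 1, st.2) else (0, st.2 + max 0 (st.1 - 4))) (0, 0)
  st.2 + max 0 (st.1 - 4)

-- ===== PRECONDITION & SPEC =====
def Spec_count (seq : List Int) (out : Int) : Prop := out = count_alt seq
instance (seq : List Int) (out : Int) : Decidable (Spec_count seq out) := by unfold Spec_count; infer_instance

-- ===== CLAIM (what is proved, stated in full; the proofs are below) =====
def Claim_equal_count : Prop := ∀ (seq : List Int), Dom_count seq → Spec_count seq (count seq)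

-- ===== LEMMAS AND PROOFS =====

-- ===== VERDICT (by name: the statement is the Claim_ definition above) =====
theorem fold_agree (seq : List Int) (run tot : Int) (hrun : 0 ≤ run) :
    (seq.foldl (fun (st : Int × Int) num =>
      let c := if num == 1 then st.1 + 1 else 0
      if c == 5 then (4, st.2 + 1) else (c, st.2)) (min run 4, tot + max 0 (run - 4))).2
    = (let st := seq.foldl (fun (st : Int × Int) num =>
        if num == 1 then (st.1 + 1, st.2) else (0, st.2 + max 0 (st.1 - 4))) (run, tot)
       st.2 + max 0 (st.1 - 4)) := by
  induction seq generalizing run tot with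
  | nil => simp
  | cons x xs ih =>
    simp only [List.foldl_cons]
    by_cases hx : x = 1
    · subst hx
      simp only [beq_self_eq_true, if_true]
      by_cases h4 : 4 ≤ run
      · have hc : ((min run 4 + 1 : Int) == 5) = true := by
          simp only [beq_iff_eq]; omega
        simp only [hc, if_true]
        have := ih (run + 1) tot (by omega)
        have e1 : (min (run+1) 4 : Int) = 4 := by omega
        have e2 : tot + max 0 (run - 4) + 1 = tot + max 0 (run + 1 - 4) := by omega
        rw [e1] at this
        rw [e2]
        exact this
      · have hc : ((min run 4 + 1 : Int) == 5) = false := by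
          simp only [beq_eq_false_iff_ne, ne_eq]; omega
        simp only [hc]
        have := ih (run + 1) tot (by omega)
        have e1 : min run 4 + 1 = min (run+1) 4 := by omega
        have e2 : max 0 (run - 4) = max 0 (run + 1 - 4) := by omega
        rw [e1, e2]
        exact this
    · have hb : ((x : Int) == 1) = false := by
        simp only [beq_eq_false_iff_ne, ne_eq]; exact hx
      simp only [hb]
      have := ih 0 (tot + max 0 (run - 4)) (le_refl 0)
      have e1 : (min (0:Int) 4) = 0 := by omega
      have e2 : tot + max 0 (run - 4) + max 0 ((0:Int) - 4) = tot + max 0 (run - 4) := by omega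
      rw [e1, e2] at this
      exact this

-- ===== VERDICT =====
theorem count_spec : Claim_equal_count := by
  intro seq _
  unfold Spec_count count count_alt
  have := fold_agree seq 0 0 (le_refl 0)
  simpa using this
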